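-- pv_equiv track=rewrite | github.com/zhangjr-gaoyou/docresearch | backend/app/services/research/step_execution_agent.py | _split_markdown_blocks
-- ===== SOURCE A (Python) =====
-- def _split_markdown_blocks(s: str, max_chunk: int) -> list[str]:
--     """Split long markdown near newlines so map_merge inputs stay smaller (avoids one huge completion)."""
--     if max_chunk <= 0 or len(s) <= max_chunk:
--         return [s]
--     parts: list[str] = []
--     start = 0
--     n = len(s)
--     while start < n:
--         end = min(n, start + max_chunk)
--         if end < n:
--             cut = s.rfind("\n", max(0, end - 2500), end)
--             if cut > start:
--                 end = cut
--         parts.append(s[start:end].rstrip())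
--         start = end
--     return [p for p in parts if p]
-- ===== SOURCE B (Python) =====
-- def _split_markdown_blocks(s: str, max_chunk: int) -> list[str]:
--     """Split long markdown near newlines, in three staged passes: (1) one scan builds a
--     previous-newline DP array, (2) chunk boundaries are computed from it with O(1) lookups
--     (no windowed substring search), (3) the boundary list is turned into cleaned slices."""
--     if max_chunk <= 0 or len(s) <= max_chunk:
--         return [s]
--     n = len(s)
--     # pass 1: prev_nl[i] = index of the last '\n' at position <= i, or -1
--     prev_nl = [-1] * n
--     last = -1
--     for i, ch in enumerate(s):
--         if ch == "\n":
--             last = i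
--         prev_nl[i] = last
--     # pass 2: boundary indices 0 = b0 < b1 < ... < bk = n
--     bounds = [0]
--     while bounds[-1] < n:
--         start = bounds[-1]
--         end = min(n, start + max_chunk)
--         if end < n:
--             p = prev_nl[end - 1]
--             if p >= end - 2500 and p > start:
--                 end = p
--         bounds.append(end)
--     # pass 3: slice, clean, drop empties
--     out: list[str] = []
--     for a, b in zip(bounds, bounds[1:]):
--         t = s[a:b].rstrip()
--         if t:
--             out.append(t)
--     return out
-- ===== Notes on version B (the rewrite author's own statement) =====
-- stated objective: alternative
-- what changed: B is restructured into three staged passes: a dynamic-programming scan building a previous-newline array so every windowed str.rfind becomes one O(1) array lookup, then a boundary-index list computed from that array alone, then a separate pass turning consecutive boundaries into rstripped non-empty slices (A fuses search, slicing and appending into one while loop).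
import Mathlib
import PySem

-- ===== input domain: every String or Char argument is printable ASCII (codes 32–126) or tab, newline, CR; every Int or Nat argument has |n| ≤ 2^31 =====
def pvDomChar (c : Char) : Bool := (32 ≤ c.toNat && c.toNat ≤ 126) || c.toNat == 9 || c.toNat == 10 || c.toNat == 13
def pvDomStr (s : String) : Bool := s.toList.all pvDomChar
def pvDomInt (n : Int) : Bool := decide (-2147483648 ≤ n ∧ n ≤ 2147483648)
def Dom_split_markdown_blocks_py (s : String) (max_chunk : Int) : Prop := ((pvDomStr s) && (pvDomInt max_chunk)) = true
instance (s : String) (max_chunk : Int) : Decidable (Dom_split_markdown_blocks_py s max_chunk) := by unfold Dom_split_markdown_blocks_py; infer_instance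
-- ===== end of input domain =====

-- B restages the computation: a previous-newline DP array replaces A's windowed rfind, a
-- boundary-index list is computed from it, and a separate pass slices and cleans (objective: alternative).

-- ===== PORT A =====
-- while-loop of A; fuel = remaining iterations bound (start grows by ≥ 1 per step since
-- max_chunk ≥ 1 whenever the loop is reached, so fuel = l.length suffices)
def splitLoopA (l : List Char) (n mc : Int) (fuel : Nat) (start : Int)
    (parts : List (List Char)) : List (List Char) :=
  match fuel with
  | 0 => parts
  | fuel + 1 =>
    if start < n then
      let end0 := min n (start + mc)
      let e :=
        if end0 < n then
          let cut := PySem.Chars.rfindFrom l ['\n'] (max 0 (end0 - 2500)) (some end0)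
          if start < cut then cut else end0
        else end0
      splitLoopA l n mc fuel e
        (parts ++ [PySem.Chars.rstrip (PySem.Chars.slice l (some start) (some e))])
    else parts

def split_markdown_blocks_py (s : String) (max_chunk : Int) : List String :=
  if max_chunk ≤ 0 ∨ PySem.Str.len s ≤ max_chunk then [s]
  else
    let l := s.toList
    let n : Int := l.length
    ((splitLoopA l n max_chunk l.length 0 []).filter (fun p => !p.isEmpty)).map String.ofList

-- ===== PORT B =====
-- pass 1 of B: prev_nl[i] = index of the last '\n' at position ≤ i, or -1
def prevNLAux (l : List Char) (i last : Int) : List Int :=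
  match l with
  | [] => []
  | c :: t =>
    let last' := if c = '\n' then i else last
    last' :: prevNLAux t (i + 1) last'

def prevNL (l : List Char) : List Int := prevNLAux l 0 (-1)

-- pass 2 of B: the boundary-index list; `pnl.getD (end0-1).toNat (-1)` is Python's
-- `prev_nl[end-1]`, exact since 1 ≤ end0 ≤ n there; fuel bound as in A's loop
def boundsLoop (n mc : Int) (pnl : List Int) (fuel : Nat) (start : Int)
    (acc : List Int) : List Int :=
  match fuel with
  | 0 => acc
  | fuel + 1 =>
    if start < n then
      let end0 := min n (start + mc)
      let e :=
        if end0 < n then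
          let p := pnl.getD (end0 - 1).toNat (-1)
          if end0 - 2500 ≤ p ∧ start < p then p else end0
        else end0
      boundsLoop n mc pnl fuel e (acc ++ [e])
    else acc

def split_markdown_blocks_py_alt (s : String) (max_chunk : Int) : List String :=
  if max_chunk ≤ 0 ∨ PySem.Str.len s ≤ max_chunk then [s]
  else
    let l := s.toList
    let n : Int := l.length
    let bounds := 0 :: boundsLoop n max_chunk (prevNL l) l.length 0 []
    -- pass 3 of B: for a, b in zip(bounds, bounds[1:]): keep s[a:b].rstrip() if non-empty
    ((bounds.zip bounds.tail).foldl
      (fun out ab =>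
        let t := PySem.Chars.rstrip (PySem.Chars.slice l (some ab.1) (some ab.2))
        if !t.isEmpty then out ++ [t] else out) []).map String.ofList

-- ===== PRECONDITION & SPEC =====
def Spec_split_markdown_blocks_py (s : String) (max_chunk : Int) (out : List String) : Prop := out = split_markdown_blocks_py_alt s max_chunk
instance (s : String) (max_chunk : Int) (out : List String) : Decidable (Spec_split_markdown_blocks_py s max_chunk out) := by unfold Spec_split_markdown_blocks_py; infer_instance

-- ===== CLAIM (what is proved, stated in full; the proofs are below) =====
def Claim_equal_split_markdown_blocks_py : Prop := ∀ (s : String) (max_chunk : Int), Dom_split_markdown_blocks_py s max_chunk → Spec_split_markdown_blocks_py s max_chunk (split_markdown_blocks_py s max_chunk)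

-- ===== LEMMAS AND PROOFS =====

-- `[c].isPrefixOf xs` is exactly "xs starts with c"
theorem prefixOf_single (c : Char) (xs : List Char) :
    [c].isPrefixOf xs = true ↔ xs.head? = some c := by
  rw [List.isPrefixOf_iff_prefix]
  cases xs with
  | nil => simp
  | cons x xs => simp [List.cons_prefix_cons, eq_comm]

-- `rfind.go` scans positions m, m-1, …, 0 and returns the greatest hit
theorem go_spec (w : List Char) (c : Char) (m : Nat) :
    PySem.Chars.rfind.go w [c] m =
      if ∃ k, k ≤ m ∧ w[k]? = some c
      then ((Nat.findGreatest (fun k => w[k]? = some c) m : Nat) : Int)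
      else -1 := by
  induction m with
  | zero =>
    rw [PySem.Chars.rfind.go]
    have h0 : [c].isPrefixOf w = true ↔ w[0]? = some c := by
      rw [prefixOf_single, List.head?_eq_getElem?]
    by_cases h : w[0]? = some c
    · rw [if_pos (h0.mpr h), if_pos ⟨0, le_rfl, h⟩, Nat.findGreatest_zero]
      simp
    · rw [if_neg (fun hh => h (h0.mp hh)), if_neg]
      rintro ⟨k, hk, hkc⟩
      have hk0 : k = 0 := by omega
      subst hk0
      exact h hkc
  | succ m ih =>
    rw [PySem.Chars.rfind.go]
    have hd : [c].isPrefixOf (w.drop (m + 1)) = true ↔ w[m + 1]? = some c := by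
      rw [prefixOf_single, List.head?_drop]
    by_cases h : w[m + 1]? = some c
    · have hex : ∃ k, k ≤ m + 1 ∧ w[k]? = some c := ⟨m + 1, le_rfl, h⟩
      rw [if_pos (hd.mpr h), if_pos hex, Nat.findGreatest_succ, if_pos h]
    · have hiff : (∃ k, k ≤ m + 1 ∧ w[k]? = some c) ↔
          (∃ k, k ≤ m ∧ w[k]? = some c) := by
        constructor
        · rintro ⟨k, hk, hkc⟩
          rcases Nat.lt_or_ge k (m + 1) with hlt | hge
          · exact ⟨k, by omega, hkc⟩
          · have hkeq : k = m + 1 := by omega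
            rw [hkeq] at hkc
            exact absurd hkc h
        · rintro ⟨k, hk, hkc⟩; exact ⟨k, by omega, hkc⟩
      rw [if_neg (fun hh => h (hd.mp hh)), ih, Nat.findGreatest_succ, if_neg h]
      by_cases hex : ∃ k, k ≤ m ∧ w[k]? = some c
      · rw [if_pos hex, if_pos (hiff.mpr hex)]
      · rw [if_neg hex, if_neg (fun hh => hex (hiff.mp hh))]

theorem rfind_single (w : List Char) (c : Char) :
    PySem.Chars.rfind w [c] =
      if ∃ k, k ≤ w.length ∧ w[k]? = some c
      then ((Nat.findGreatest (fun k => w[k]? = some c) w.length : Nat) : Int)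
      else -1 := by
  rw [PySem.Chars.rfind, go_spec]

-- elementwise characterisation of B's previous-newline array
theorem prevNLAux_spec (l : List Char) (i last : Int) (hlast : last < i) (k : Nat)
    (hk : k < l.length) :
    ((prevNLAux l i last).getD k (-1) = last ∧
       ∀ j : Nat, j ≤ k → ¬ l[j]? = some '\n') ∨
    (i ≤ (prevNLAux l i last).getD k (-1) ∧
       (prevNLAux l i last).getD k (-1) - i ≤ (k : Int) ∧
       l[((prevNLAux l i last).getD k (-1) - i).toNat]? = some '\n' ∧
       ∀ j : Nat, ((prevNLAux l i last).getD k (-1) - i).toNat < j → j ≤ k →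
         ¬ l[j]? = some '\n') := by
  induction l generalizing i last k with
  | nil => simp at hk
  | cons c t ih =>
    have hstep : prevNLAux (c :: t) i last
        = (if c = '\n' then i else last) :: prevNLAux t (i + 1) (if c = '\n' then i else last) :=
      rfl
    by_cases hc : c = '\n'
    · rw [hstep, if_pos hc]
      cases k with
      | zero =>
        right
        rw [List.getD_cons_zero]
        refine ⟨le_rfl, by omega, ?_, ?_⟩
        · rw [show (i - i).toNat = 0 by omega, List.getElem?_cons_zero, hc]
        · intro j hj1 hj2
          rw [show (i - i).toNat = 0 by omega] at hj1
          omega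
      | succ k =>
        have hk2 : k < t.length := by simpa using hk
        rcases ih (i + 1) i (by omega) k hk2 with ⟨hv, hnone⟩ | ⟨h1, h2, h3, h4⟩
        · right
          rw [List.getD_cons_succ, hv]
          refine ⟨le_rfl, by omega, ?_, ?_⟩
          · rw [show (i - i).toNat = 0 by omega, List.getElem?_cons_zero, hc]
          · intro j hj1 hj2
            rw [show (i - i).toNat = 0 by omega] at hj1
            cases j with
            | zero => omega
            | succ m =>
              rw [List.getElem?_cons_succ]
              exact hnone m (by omega)
        · right
          rw [List.getD_cons_succ]
          set v := (prevNLAux t (i + 1) i).getD k (-1) with hvdef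
          have htoNat : (v - i).toNat = (v - (i + 1)).toNat + 1 := by omega
          refine ⟨by omega, by omega, ?_, ?_⟩
          · rw [htoNat, List.getElem?_cons_succ]
            exact h3
          · intro j hj1 hj2
            rw [htoNat] at hj1
            cases j with
            | zero => omega
            | succ m =>
              rw [List.getElem?_cons_succ]
              exact h4 m (by omega) (by omega)
    · rw [hstep, if_neg hc]
      cases k with
      | zero =>
        left
        rw [List.getD_cons_zero]
        refine ⟨rfl, ?_⟩
        intro j hj
        have hj0 : j = 0 := by omega
        subst hj0
        rw [List.getElem?_cons_zero]
        intro hcon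
        exact hc (Option.some_inj.mp hcon)
      | succ k =>
        have hk2 : k < t.length := by simpa using hk
        rcases ih (i + 1) last (by omega) k hk2 with ⟨hv, hnone⟩ | ⟨h1, h2, h3, h4⟩
        · left
          rw [List.getD_cons_succ]
          refine ⟨hv, ?_⟩
          intro j hj
          cases j with
          | zero =>
            rw [List.getElem?_cons_zero]
            intro hcon
            exact hc (Option.some_inj.mp hcon)
          | succ m =>
            rw [List.getElem?_cons_succ]
            exact hnone m (by omega)
        · right
          rw [List.getD_cons_succ]
          set v := (prevNLAux t (i + 1) last).getD k (-1) with hvdef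
          have htoNat : (v - i).toNat = (v - (i + 1)).toNat + 1 := by omega
          refine ⟨by omega, by omega, ?_, ?_⟩
          · rw [htoNat, List.getElem?_cons_succ]
            exact h3
          · intro j hj1 hj2
            rw [htoNat] at hj1
            cases j with
            | zero => omega
            | succ m =>
              rw [List.getElem?_cons_succ]
              exact h4 m (by omega) (by omega)

theorem prevNL_spec (l : List Char) (k : Nat) (hk : k < l.length) :
    ((prevNL l).getD k (-1) = -1 ∧ ∀ j : Nat, j ≤ k → ¬ l[j]? = some '\n') ∨
    (0 ≤ (prevNL l).getD k (-1) ∧ (prevNL l).getD k (-1) ≤ (k : Int) ∧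
       l[((prevNL l).getD k (-1)).toNat]? = some '\n' ∧
       ∀ j : Nat, ((prevNL l).getD k (-1)).toNat < j → j ≤ k → ¬ l[j]? = some '\n') := by
  rcases prevNLAux_spec l 0 (-1) (by omega) k hk with ⟨hv, hnone⟩ | ⟨h1, h2, h3, h4⟩
  · exact Or.inl ⟨hv, hnone⟩
  · right
    rw [prevNL]
    set v := (prevNLAux l 0 (-1)).getD k (-1) with hvdef
    rw [show v - 0 = v by ring] at h2 h3 h4
    exact ⟨h1, h2, h3, h4⟩

-- THE KEY LEMMA: A's windowed rfind computed from B's previous-newline array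
theorem key (l : List Char) (e : Int) (h1 : 1 ≤ e) (h2 : e ≤ (l.length : Int)) :
    PySem.Chars.rfindFrom l ['\n'] (max 0 (e - 2500)) (some e) =
      if max 0 (e - 2500) ≤ (prevNL l).getD (e - 1).toNat (-1)
      then (prevNL l).getD (e - 1).toNat (-1) else -1 := by
  set lo : Int := max 0 (e - 2500) with hlodef
  have hlo0 : 0 ≤ lo := le_max_left _ _
  have hloe : lo ≤ e := by omega
  have hL : PySem.Chars.rfindFrom l ['\n'] lo (some e) =
      (if PySem.Chars.rfind ((l.take e.toNat).drop lo.toNat) ['\n'] = -1 then -1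
       else lo + PySem.Chars.rfind ((l.take e.toNat).drop lo.toNat) ['\n']) := by
    simp only [PySem.Chars.rfindFrom]
    rw [if_neg (show ¬((l.length : Int) < e) by omega),
        if_neg (show ¬(e < 0) by omega),
        if_neg (show ¬(lo < 0) by omega),
        if_neg (show ¬(e < lo) by omega)]
  rw [hL]
  set W := (l.take e.toNat).drop lo.toNat with hW
  have hWget : ∀ r : Nat, W[r]? = some '\n' ↔
      (lo.toNat + r < e.toNat ∧ l[lo.toNat + r]? = some '\n') := by
    intro r
    rw [hW, List.getElem?_drop, List.getElem?_take]
    by_cases hr : lo.toNat + r < e.toNat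
    · simp [hr]
    · simp [hr]
  have hke : (e - 1).toNat < l.length := by omega
  rcases prevNL_spec l (e - 1).toNat hke with ⟨hp, hnone⟩ | ⟨hp0, hpk, hpnl, hmax⟩
  · -- no newline at any index ≤ e-1: window is empty of newlines
    have hnoW : ¬ ∃ r, r ≤ W.length ∧ W[r]? = some '\n' := by
      rintro ⟨r, -, hr⟩
      rw [hWget] at hr
      exact hnone (lo.toNat + r) (by omega) hr.2
    rw [rfind_single, if_neg hnoW, if_pos rfl, if_neg (by omega)]
  · set p := (prevNL l).getD (e - 1).toNat (-1) with hpdef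
    by_cases hlop : lo ≤ p
    · -- the last newline p lies inside the window
      have hr0 : W[p.toNat - lo.toNat]? = some '\n' := by
        rw [hWget]
        refine ⟨by omega, ?_⟩
        rw [show lo.toNat + (p.toNat - lo.toNat) = p.toNat by omega]
        exact hpnl
      obtain ⟨hr0len, -⟩ := List.getElem?_eq_some_iff.mp hr0
      set g := Nat.findGreatest (fun r => W[r]? = some '\n') W.length with hg
      have hPg : W[g]? = some '\n' := by
        rw [hg]
        exact Nat.findGreatest_spec (P := fun r => W[r]? = some '\n')
          (Nat.le_of_lt hr0len) hr0
      obtain ⟨hglt, hgnl⟩ := (hWget g).mp hPg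
      have hgle : lo.toNat + g ≤ p.toNat := by
        by_contra hcon
        exact hmax (lo.toNat + g) (by omega) (by omega) hgnl
      have hgge : p.toNat - lo.toNat ≤ g := by
        rw [hg]
        exact Nat.le_findGreatest (Nat.le_of_lt hr0len) hr0
      have hval : PySem.Chars.rfind W ['\n'] = (g : Int) := by
        rw [rfind_single, if_pos ⟨p.toNat - lo.toNat, Nat.le_of_lt hr0len, hr0⟩, ← hg]
      rw [hval, if_neg (show ¬((g : Int) = -1) by omega), if_pos hlop]
      omega
    · -- the last newline (if any) is before the window
      have hnoW : ¬ ∃ r, r ≤ W.length ∧ W[r]? = some '\n' := by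
        rintro ⟨r, -, hr⟩
        rw [hWget] at hr
        have hle : lo.toNat + r ≤ p.toNat := by
          by_contra hcon
          exact hmax (lo.toNat + r) (by omega) (by omega) hr.2
        omega
      rw [rfind_single, if_neg hnoW, if_pos rfl, if_neg hlop]

-- the adjusted chunk end of one step, computed A's way and B's way
theorem cut_eq (l : List Char) (start end0 : Int) (hs : 0 ≤ start) (h1 : 1 ≤ end0)
    (h2 : end0 ≤ (l.length : Int)) :
    (if start < PySem.Chars.rfindFrom l ['\n'] (max 0 (end0 - 2500)) (some end0)
     then PySem.Chars.rfindFrom l ['\n'] (max 0 (end0 - 2500)) (some end0) else end0)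
    = (if end0 - 2500 ≤ (prevNL l).getD (end0 - 1).toNat (-1)
          ∧ start < (prevNL l).getD (end0 - 1).toNat (-1)
       then (prevNL l).getD (end0 - 1).toNat (-1) else end0) := by
  rw [key l end0 h1 h2]
  set p := (prevNL l).getD (end0 - 1).toNat (-1) with hp
  have hlo1 : (0 : Int) ≤ max 0 (end0 - 2500) := le_max_left _ _
  have hlo2 : end0 - 2500 ≤ max 0 (end0 - 2500) := le_max_right _ _
  have hlo3 : max 0 (end0 - 2500) = 0 ∨ max 0 (end0 - 2500) = end0 - 2500 :=
    max_choice _ _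
  by_cases hlop : max 0 (end0 - 2500) ≤ p
  · rw [if_pos hlop]
    by_cases hsp : start < p
    · rw [if_pos hsp, if_pos ⟨by omega, hsp⟩]
    · rw [if_neg hsp, if_neg (fun hc => hsp hc.2)]
  · rw [if_neg hlop, if_neg (show ¬(start < -1) by omega), if_neg]
    rintro ⟨hc1, hc2⟩
    omega

-- boundsLoop's accumulator is an append
theorem boundsLoop_acc (n mc : Int) (pnl : List Int) (fuel : Nat) :
    ∀ (start : Int) (acc : List Int),
    boundsLoop n mc pnl fuel start acc = acc ++ boundsLoop n mc pnl fuel start [] := by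
  induction fuel with
  | zero => intro start acc; simp [boundsLoop]
  | succ fuel ih =>
    intro start acc
    simp only [boundsLoop]
    by_cases hstart : start < n
    · rw [if_pos hstart, if_pos hstart, ih, ih _ ([] ++ _)]
      simp
    · rw [if_neg hstart, if_neg hstart]
      simp

-- A's fused loop equals the map over B's consecutive-boundary pairs
theorem loopA_eq (l : List Char) (mc : Int) (hmc : 1 ≤ mc) (fuel : Nat) :
    ∀ (start : Int), 0 ≤ start → ∀ (parts : List (List Char)),
    splitLoopA l (l.length : Int) mc fuel start parts
      = parts ++
        ((start :: boundsLoop (l.length : Int) mc (prevNL l) fuel start []).zip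
           (boundsLoop (l.length : Int) mc (prevNL l) fuel start [])).map
          (fun ab => PySem.Chars.rstrip (PySem.Chars.slice l (some ab.1) (some ab.2))) := by
  induction fuel with
  | zero => intro start hs parts; simp [splitLoopA, boundsLoop]
  | succ fuel ih =>
    intro start hs parts
    simp only [splitLoopA, boundsLoop]
    by_cases hstart : start < (l.length : Int)
    · rw [if_pos hstart, if_pos hstart]
      set end0 := min (l.length : Int) (start + mc) with hend0
      have he1 : 1 ≤ end0 := by omega
      have he2 : end0 ≤ (l.length : Int) := by omega
      set eB := (if end0 < (l.length : Int) then
          (if end0 - 2500 ≤ (prevNL l).getD (end0 - 1).toNat (-1)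
              ∧ start < (prevNL l).getD (end0 - 1).toNat (-1)
           then (prevNL l).getD (end0 - 1).toNat (-1) else end0)
        else end0) with heB
      have hAB : (if end0 < (l.length : Int) then
          (let cut := PySem.Chars.rfindFrom l ['\n'] (max 0 (end0 - 2500)) (some end0)
           if start < cut then cut else end0)
        else end0) = eB := by
        rw [heB]
        by_cases hlt : end0 < (l.length : Int)
        · rw [if_pos hlt, if_pos hlt]
          exact cut_eq l start end0 hs he1 he2
        · rw [if_neg hlt, if_neg hlt]
      have heB0 : 0 ≤ eB := by
        rw [heB]
        by_cases hlt : end0 < (l.length : Int)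
        · rw [if_pos hlt]
          by_cases hc : end0 - 2500 ≤ (prevNL l).getD (end0 - 1).toNat (-1)
              ∧ start < (prevNL l).getD (end0 - 1).toNat (-1)
          · rw [if_pos hc]; omega
          · rw [if_neg hc]; omega
        · rw [if_neg hlt]; omega
      rw [hAB, boundsLoop_acc, List.nil_append, ih eB heB0]
      simp [List.zip_cons_cons, List.append_assoc]
    · rw [if_neg hstart, if_neg hstart]
      simp

-- B's conditional-append fold is a map-then-filter
theorem foldl_if_filter (l : List Char) (xs : List (Int × Int)) :
    ∀ (acc : List (List Char)),
    xs.foldl (fun out ab =>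
        let t := PySem.Chars.rstrip (PySem.Chars.slice l (some ab.1) (some ab.2))
        if !t.isEmpty then out ++ [t] else out) acc
      = acc ++ ((xs.map (fun ab =>
          PySem.Chars.rstrip (PySem.Chars.slice l (some ab.1) (some ab.2)))).filter
            (fun p => !p.isEmpty)) := by
  induction xs with
  | nil => intro acc; simp
  | cons x t ih =>
    intro acc
    rw [List.foldl_cons, List.map_cons, List.filter_cons]
    show List.foldl _
        (if (!(PySem.Chars.rstrip (PySem.Chars.slice l (some x.1) (some x.2))).isEmpty) = true
         then acc ++ [PySem.Chars.rstrip (PySem.Chars.slice l (some x.1) (some x.2))]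
         else acc) t = _
    by_cases hx : (!(PySem.Chars.rstrip
        (PySem.Chars.slice l (some x.1) (some x.2))).isEmpty) = true
    · rw [if_pos hx, if_pos hx, ih, List.append_assoc, List.singleton_append]
    · rw [if_neg hx, if_neg hx, ih]

-- ===== VERDICT (by name: the statement is the Claim_ definition above) =====
theorem split_markdown_blocks_py_spec : Claim_equal_split_markdown_blocks_py := by
  intro s mc _
  unfold Spec_split_markdown_blocks_py split_markdown_blocks_py split_markdown_blocks_py_alt
  by_cases h : mc ≤ 0 ∨ PySem.Str.len s ≤ mc
  · rw [if_pos h, if_pos h]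
  · rw [if_neg h, if_neg h]
    have hmc : 1 ≤ mc := by
      rcases not_or.mp h with ⟨h1, -⟩
      omega
    show ((splitLoopA s.toList (s.toList.length : Int) mc s.toList.length 0 []).filter
        (fun p => !p.isEmpty)).map String.ofList = _
    rw [loopA_eq s.toList mc hmc s.toList.length 0 le_rfl [], List.nil_append]
    show _ = List.map String.ofList
      (((0 :: boundsLoop (s.toList.length : Int) mc (prevNL s.toList)
            s.toList.length 0 []).zip
          (boundsLoop (s.toList.length : Int) mc (prevNL s.toList)
            s.toList.length 0 [])).foldl
        (fun out ab =>
          let t := PySem.Chars.rstrip (PySem.Chars.slice s.toList (some ab.1) (some ab.2))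
          if !t.isEmpty then out ++ [t] else out) [])
    rw [foldl_if_filter s.toList _ [], List.nil_append]
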